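-- pv_equiv track=rewrite | github.com/katya1242/PythonScripts | CodeWars/SumOfNumbers.py | get_sum
-- ===== SOURCE A (Python) =====
-- def get_sum(a,b):
--     if a == b:
--         return a
--     c = min(a, b)
--     d = max(a, b)
--     sum = c
--     while c < d:
--         sum += c + 1
--         c += 1
--     return sum
-- ===== SOURCE B (Python) =====
-- def get_sum(a, b):
--     return (a + b) * (abs(b - a) + 1) // 2
-- ===== Notes on version B (the rewrite author's own statement) =====
-- stated objective: faster
-- what changed: Replaced the increment-by-one summation loop with the closed-form arithmetic-series formula (a+b)*(|b-a|+1)//2.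
import Mathlib
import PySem

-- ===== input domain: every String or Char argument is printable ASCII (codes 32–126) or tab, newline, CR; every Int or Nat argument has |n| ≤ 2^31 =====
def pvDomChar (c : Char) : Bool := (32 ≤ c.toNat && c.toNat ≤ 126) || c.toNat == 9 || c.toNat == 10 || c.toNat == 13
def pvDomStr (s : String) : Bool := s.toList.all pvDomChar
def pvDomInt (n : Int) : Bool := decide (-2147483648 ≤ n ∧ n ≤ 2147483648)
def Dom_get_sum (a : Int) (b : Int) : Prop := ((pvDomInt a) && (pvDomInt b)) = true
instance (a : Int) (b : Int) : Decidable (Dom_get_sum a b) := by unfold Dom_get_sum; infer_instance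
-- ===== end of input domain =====

-- B replaces A's unit-step summation loop with the closed-form arithmetic-series formula (O(1) instead of O(|a-b|)).
-- ===== PORT A =====
def getSumLoop (c d sum : Int) : Int :=
  if c < d then getSumLoop (c + 1) d (sum + (c + 1)) else sum
termination_by (d - c).toNat
decreasing_by omega

def get_sum (a : Int) (b : Int) : Int :=
  if a == b then a
  else
    let c := min a b
    let d := max a b
    getSumLoop c d c

-- ===== PORT B =====
def get_sum_alt (a : Int) (b : Int) : Int := PySem.Int.floordiv ((a + b) * ((b - a).natAbs + 1)) 2

-- ===== PRECONDITION & SPEC =====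
def Spec_get_sum (a : Int) (b : Int) (out : Int) : Prop := out = get_sum_alt a b
instance (a : Int) (b : Int) (out : Int) : Decidable (Spec_get_sum a b out) := by unfold Spec_get_sum; infer_instance

-- ===== CLAIM (what is proved, stated in full; the proofs are below) =====
def Claim_equal_get_sum : Prop := ∀ (a : Int) (b : Int), Dom_get_sum a b → Spec_get_sum a b (get_sum a b)

-- ===== LEMMAS AND PROOFS =====

-- ===== VERDICT (by name: the statement is the Claim_ definition above) =====
theorem two_mul_getSumLoop (n : Nat) : ∀ (c s : Int), 2 * getSumLoop c (c + n) s = 2 * s + n * (2 * c + n + 1) := by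
  induction n with
  | zero => intro c s; rw [getSumLoop]; simp
  | succ k ih =>
    intro c s
    rw [getSumLoop]
    have hlt : c < c + (k + 1 : Nat) := by push_cast; omega
    simp only [if_pos hlt]
    have : c + (k + 1 : Nat) = (c + 1) + (k : Nat) := by push_cast; ring
    rw [this, ih (c + 1) (s + (c + 1))]
    push_cast
    ring

theorem get_sum_spec : Claim_equal_get_sum := by
  intro a b _
  unfold Spec_get_sum get_sum get_sum_alt
  by_cases hab : a = b
  · subst hab
    simp only [beq_self_eq_true, if_pos]
    have : (a - a).natAbs = 0 := by omega
    rw [this]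
    have h2 : (a + a) * ((0 : Nat) + 1) = 2 * a := by push_cast; ring
    rw [h2, PySem.Int.floordiv_eq_ediv_of_pos (by omega)]
    omega
  · simp only [beq_iff_eq, if_neg hab]
    set c := min a b with hc
    set d := max a b with hd
    have hcd : c < d := by simp only [hc, hd]; omega
    have hn : d = c + ((d - c).toNat : Int) := by omega
    have h2 := two_mul_getSumLoop (d - c).toNat c c
    rw [← hn] at h2
    have habs : ((b - a).natAbs : Int) = d - c := by simp only [hc, hd]; omega
    have heq : (a + b) * (((b - a).natAbs : Int) + 1) = 2 * getSumLoop c d c := by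
      rw [habs, h2]
      have : a + b = c + d := by simp only [hc, hd]; omega
      rw [this]
      have : ((d - c).toNat : Int) = d - c := by omega
      rw [this]; ring
    rw [heq, PySem.Int.floordiv_eq_ediv_of_pos (by omega)]
    omega
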